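-- pv_equiv track=rewrite | github.com/Aviroop07/NL2DATA | NL2DATA/utils/validation/state_validation.py | validate_no_duplicate_entities
-- ===== SOURCE A (Python) =====
-- from typing import Dict, Any, List, Set
--
-- def validate_no_duplicate_entities(entities: List[Dict[str, Any]]) -> List[str]:
--     """
--     Check for duplicate entity names after consolidation.
--
--     Args:
--         entities: List of entity dictionaries
--
--     Returns:
--         List of validation issue messages (empty if no duplicates)
--     """
--     issues = []
--     seen_names = {}
--
--     for i, entity in enumerate(entities):
--         if isinstance(entity, dict):
--             entity_name = entity.get("name", "")
--         else:
--             entity_name = getattr(entity, "name", "")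
--
--         if not entity_name:
--             continue
--
--         if entity_name in seen_names:
--             issues.append(
--                 f"Duplicate entity name '{entity_name}' found at indices "
--                 f"{seen_names[entity_name]} and {i}"
--             )
--         else:
--             seen_names[entity_name] = i
--
--     return issues
-- ===== SOURCE B (Python) =====
-- from typing import Dict, Any, List
--
-- def validate_no_duplicate_entities(entities: List[Dict[str, Any]]) -> List[str]:
--     # Stage 1: group all occurrence indices by entity name.
--     positions = {}
--     for i, entity in enumerate(entities):
--         # entities are dicts here; a non-dict entity contributes no name
--         name = entity.get("name", "") if isinstance(entity, dict) else ""
--         if not name: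
--             continue
--         positions.setdefault(name, []).append(i)
--     # Stage 2: for each duplicated name, pair its first index with every later one.
--     pairs = []
--     for name, idxs in positions.items():
--         first = idxs[0]
--         for i in idxs[1:]:
--             pairs.append((i, f"Duplicate entity name '{name}' found at indices "
--                              f"{first} and {i}"))
--     # Stage 3: report in order of the later occurrence index.
--     pairs.sort(key=lambda p: p[0])
--     return [msg for _, msg in pairs]
-- ===== Notes on version B (the rewrite author's own statement) =====
-- stated objective: alternative
-- what changed: B replaces A's single-pass seen-dict scan by a three-stage group-by pipeline: build a name -> all-indices table, emit one (later_index, message) pair per extra occurrence of each duplicated name, then sort the pairs by the later index to recover A's report order.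
import Mathlib
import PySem

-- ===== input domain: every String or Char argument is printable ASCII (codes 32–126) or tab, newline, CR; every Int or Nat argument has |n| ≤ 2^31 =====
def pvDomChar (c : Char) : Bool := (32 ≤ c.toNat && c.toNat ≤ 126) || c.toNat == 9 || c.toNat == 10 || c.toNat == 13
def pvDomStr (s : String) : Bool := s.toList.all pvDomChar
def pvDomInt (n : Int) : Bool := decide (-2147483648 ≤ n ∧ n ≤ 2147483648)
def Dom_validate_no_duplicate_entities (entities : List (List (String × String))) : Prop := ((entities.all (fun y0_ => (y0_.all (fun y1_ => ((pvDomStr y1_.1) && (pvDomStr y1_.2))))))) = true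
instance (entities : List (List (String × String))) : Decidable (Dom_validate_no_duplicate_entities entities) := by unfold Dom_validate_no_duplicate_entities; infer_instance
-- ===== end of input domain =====

-- B replaces A's single-pass seen-dict scan by a three-stage group-by pipeline (name -> all
-- indices, one pair per extra occurrence, sort by the later index); objective: alternative.

-- shared f-string (identical in both Pythons)
def pvMsg (name : String) (j i : Int) : String :=
  "Duplicate entity name '" ++ name ++ "' found at indices " ++ PySem.Int.toStr j ++ " and " ++ PySem.Int.toStr i

-- entity.get("name", "") (entities are dicts under the type convention; the getattr branch is dead)
def pvEntityName (e : List (String × String)) : String := (PySem.Dict.mk e).getD "name" ""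

-- ===== PORT A =====
def validate_no_duplicate_entities (entities : List (List (String × String))) : List String :=
  ((PySem.List.enumerate entities 0).foldl
    (fun (st : List String × PySem.Dict String Int) (p : Int × List (String × String)) =>
      let entity_name := pvEntityName p.2
      if entity_name = "" then st
      else
        match st.2.get? entity_name with
        | some j => (st.1 ++ [pvMsg entity_name j p.1], st.2)
        | none   => (st.1, st.2.insert entity_name p.1))
    ([], PySem.Dict.empty)).1

-- ===== PORT B =====
def validate_no_duplicate_entities_alt (entities : List (List (String × String))) : List String :=
  -- Stage 1: group all occurrence indices by (non-empty) entity name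
  let positions : PySem.Dict String (List Int) :=
    (PySem.List.enumerate entities 0).foldl
      (fun (d : PySem.Dict String (List Int)) (p : Int × List (String × String)) =>
        let name := pvEntityName p.2
        if name = "" then d
        else d.modify name [] (· ++ [p.1]))   -- positions.setdefault(name, []).append(i)
      PySem.Dict.empty
  -- Stage 2: for each duplicated name pair its first index with every later one
  let pairs : List (Int × String) :=
    positions.items.foldl
      (fun (acc : List (Int × String)) (q : String × List Int) =>
        match q.2 with                         -- idxs[0] / idxs[1:]
        | [] => acc
        | first :: rest => acc ++ rest.map (fun i => (i, pvMsg q.1 first i)))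
      []
  -- Stage 3: report in order of the later occurrence index
  (PySem.List.sorted pairs (fun p => p.1) false).map (fun p => p.2)

-- ===== PRECONDITION & SPEC =====
def Spec_validate_no_duplicate_entities (entities : List (List (String × String))) (out : List String) : Prop := out = validate_no_duplicate_entities_alt entities
instance (entities : List (List (String × String))) (out : List String) : Decidable (Spec_validate_no_duplicate_entities entities out) := by unfold Spec_validate_no_duplicate_entities; infer_instance

-- ===== CLAIM (what is proved, stated in full; the proofs are below) =====
def Claim_equal_validate_no_duplicate_entities : Prop := ∀ (entities : List (List (String × String))), Dom_validate_no_duplicate_entities entities → Spec_validate_no_duplicate_entities entities (validate_no_duplicate_entities entities)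

-- ===== LEMMAS AND PROOFS =====

-- A's fold, abstracted to act on the name list
def pvStep (st : List String × PySem.Dict String Int) (p : Int × String) : List String × PySem.Dict String Int :=
  if p.2 = "" then st
  else
    match st.2.get? p.2 with
    | some j => (st.1 ++ [pvMsg p.2 j p.1], st.2)
    | none   => (st.1, st.2.insert p.2 p.1)

-- the common stateless characterisation both programs are reduced to
def pvBres (names : List String) : List String :=
  (PySem.List.enumerate names 0).filterMap (fun p =>
    if p.2 ≠ "" ∧ p.2 ∈ PySem.List.slice names none (some p.1) then
      some (pvMsg p.2 (((PySem.List.index? names p.2).getD 0 : Nat) : Int) p.1)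
    else none)

-- the non-empty-name occurrence list (index, name)
def pvPen (names : List String) : List (Int × String) :=
  (PySem.List.enumerate names 0).filter (fun p => decide (p.2 ≠ ""))

-- per-occurrence duplicate pair (later index, message), none at a first occurrence
def pvF (names : List String) (p : Int × String) : Option (Int × String) :=
  match (pvPen names).filter (fun q => q.2 == p.2) with
  | [] => none
  | f :: _ => if f.1 < p.1 then some (p.1, pvMsg p.2 f.1 p.1) else none

theorem pv_index?_append_singleton_of_ne {l : List String} {c v : String} (h : v ≠ c) :
    PySem.List.index? (l ++ [c]) v = PySem.List.index? l v := by
  induction l with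
  | nil =>
      have h1 := (PySem.List.index?_eq_none_iff [c] v).mpr (by simp [h])
      have h2 := (PySem.List.index?_eq_none_iff ([] : List String) v).mpr (by simp)
      rw [List.nil_append, h1, h2]
  | cons a t ih =>
      by_cases hav : a = v
      · subst hav
        rw [List.cons_append, PySem.List.index?_cons_self, PySem.List.index?_cons_self]
      · rw [List.cons_append, PySem.List.index?_cons_of_ne _ hav,
          PySem.List.index?_cons_of_ne _ hav, ih]

theorem pvA_abstract' {α β γ : Type} (entities : List α) (s : Int)
    (st : γ) (f : α → β) (g : γ → (Int × β) → γ) :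
    (PySem.List.enumerate entities s).foldl (fun st p => g st (p.1, f p.2)) st
      = (PySem.List.enumerate (entities.map f) s).foldl g st := by
  induction entities generalizing s st with
  | nil => simp [PySem.List.enumerate_nil]
  | cons e t ih => simp [PySem.List.enumerate_cons, List.foldl_cons, ih]

theorem pvBres_snoc (l : List String) (x : String) :
    pvBres (l ++ [x]) = pvBres l ++
      (if x ≠ "" ∧ x ∈ l then [pvMsg x (((PySem.List.index? l x).getD 0 : Nat) : Int) (l.length : Int)] else []) := by
  unfold pvBres
  rw [PySem.List.enumerate_append, List.filterMap_append]
  congr 1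
  · apply List.filterMap_congr
    intro p hp
    obtain ⟨k, hk, rfl⟩ := (PySem.List.mem_enumerate_iff l 0 p).mp hp
    have hz : (0 : Int) + (k : Int) = ((k : Nat) : Int) := by omega
    rw [hz, PySem.List.slice_to_natCast, PySem.List.slice_to_natCast,
      List.take_append_of_le_length (le_of_lt hk)]
    by_cases hc : l[k] ≠ "" ∧ l[k] ∈ l.take k
    · rw [if_pos hc, if_pos hc,
        PySem.List.index?_append_of_mem [x] (List.mem_of_mem_take hc.2)]
    · rw [if_neg hc, if_neg hc]
  · rw [PySem.List.enumerate_cons, PySem.List.enumerate_nil]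
    simp only [List.filterMap_cons, List.filterMap_nil]
    have hz : (0 : Int) + (l.length : Int) = ((l.length : Nat) : Int) := by omega
    rw [hz, PySem.List.slice_to_natCast, List.take_left]
    by_cases hc : x ≠ "" ∧ x ∈ l
    · rw [if_pos hc, if_pos hc, PySem.List.index?_append_of_mem [x] hc.2]
    · rw [if_neg hc, if_neg hc]

theorem pvMain (names : List String) :
    ((PySem.List.enumerate names 0).foldl pvStep ([], PySem.Dict.empty)).1 = pvBres names ∧
    ∀ x : String, x ≠ "" →
      ((PySem.List.enumerate names 0).foldl pvStep ([], PySem.Dict.empty)).2.get? x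
        = (PySem.List.index? names x).map (fun k => (k : Int)) := by
  induction names using List.reverseRecOn with
  | nil =>
      constructor
      · simp [pvBres, PySem.List.enumerate_nil]
      · intro x hx
        have := (PySem.List.index?_eq_none_iff ([] : List String) x).mpr (by simp)
        simp [PySem.List.enumerate_nil, PySem.Dict.get?_empty]
  | append_singleton l x ih =>
      obtain ⟨ih1, ih2⟩ := ih
      rw [PySem.List.enumerate_append, PySem.List.enumerate_cons, PySem.List.enumerate_nil,
        List.foldl_append, List.foldl_cons, List.foldl_nil] at *
      set r := (PySem.List.enumerate l 0).foldl pvStep ([], PySem.Dict.empty) with hr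
      rw [pvBres_snoc]
      by_cases hxe : x = ""
      · subst hxe
        constructor
        · simp [pvStep, ih1]
        · intro y hy
          have h1 : PySem.List.index? (l ++ [""]) y = PySem.List.index? l y :=
            pv_index?_append_singleton_of_ne hy
          have hst : pvStep r (0 + (l.length : Int), "") = r := by simp [pvStep]
          rw [hst, h1]
          exact ih2 y hy
      · cases hd : r.2.get? x with
        | some j =>
            have hix := ih2 x hxe
            rw [hd] at hix
            cases hik : PySem.List.index? l x with
            | none => rw [hik] at hix; simp at hix
            | some k =>
                rw [hik] at hix
                have hj : j = (k : Int) := by simpa using hix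
                have hmem : x ∈ l := (PySem.List.index?_isSome_iff l x).mp (by rw [hik]; rfl)
                constructor
                · rw [show pvStep r (0 + (l.length : Int), x) = (r.1 ++ [pvMsg x j (0 + (l.length : Int))], r.2) by
                      simp [pvStep, hxe, hd]]
                  rw [if_pos ⟨hxe, hmem⟩]
                  simp [ih1, hj]
                · intro y hy
                  rw [show (pvStep r (0 + (l.length : Int), x)).2 = r.2 by simp [pvStep, hxe, hd]]
                  by_cases hyx : y = x
                  · rw [hyx, hd, PySem.List.index?_append_of_mem [x] hmem, hik]
                    simp [hj]
                  · rw [ih2 y hy, pv_index?_append_singleton_of_ne hyx]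
        | none =>
            have hix := ih2 x hxe
            rw [hd] at hix
            have hnm : x ∉ l := by
              intro hmem
              have := (PySem.List.index?_isSome_iff l x).mpr hmem
              cases hik : PySem.List.index? l x with
              | none => rw [hik] at this; simp at this
              | some k => rw [hik] at hix; simp at hix
            constructor
            · rw [show pvStep r (0 + (l.length : Int), x) = (r.1, r.2.insert x (0 + (l.length : Int))) by
                  simp [pvStep, hxe, hd]]
              rw [if_neg (by tauto), ih1]
              simp
            · intro y hy
              rw [show (pvStep r (0 + (l.length : Int), x)).2 = r.2.insert x (0 + (l.length : Int)) by
                  simp [pvStep, hxe, hd]]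
              by_cases hyx : y = x
              · subst hyx
                rw [PySem.Dict.get?_insert_self, PySem.List.index?_append_singleton_self l y hnm]
                simp
              · rw [PySem.Dict.get?_insert_of_ne _ _ hyx, ih2 y hy,
                  pv_index?_append_singleton_of_ne hyx]

-- ---------- B side ----------

-- the pair list a name-group contributes
def pvGroupPairs (c : String) (idxs : List Int) : List (Int × String) :=
  match idxs with
  | [] => []
  | f :: r => r.map (fun i => (i, pvMsg c f i))

-- the grouping dict B builds, abstracted to the name list
def pvD (names : List String) : PySem.Dict String (List Int) :=
  (pvPen names).foldl (fun d p => d.modify p.2 [] (· ++ [p.1])) PySem.Dict.empty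

theorem pvPen_pairwise (names : List String) :
    (pvPen names).Pairwise (fun a b => a.1 < b.1) :=
  (PySem.List.pairwise_lt_enumerate names 0).filter _

theorem pvGroup_perm (ks : List String) (l : List (Int × String)) (hnd : ks.Nodup)
    (hall : ∀ x ∈ l, x.2 ∈ ks) :
    (ks.flatMap (fun c => l.filter (fun q => q.2 == c))).Perm l := by
  induction ks generalizing l with
  | nil =>
      have : l = [] := by
        cases l with
        | nil => rfl
        | cons a t => exact absurd (hall a (by simp)) (by simp)
      simp [this]
  | cons c ks' ih =>
      rw [List.flatMap_cons]
      have hnd' : ks'.Nodup := hnd.of_cons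
      have hcn : c ∉ ks' := by simpa using (List.nodup_cons.mp hnd).1
      have hflat : ks'.flatMap (fun c' => l.filter (fun q => q.2 == c'))
          = ks'.flatMap (fun c' => (l.filter (fun q => !(q.2 == c))).filter (fun q => q.2 == c')) := by
        apply List.flatMap_congr
        intro c' hc'
        rw [List.filter_filter]
        apply List.filter_congr
        intro q _
        by_cases h : q.2 = c' <;> by_cases h2 : q.2 = c <;> simp_all
      rw [hflat]
      have hperm := ih (l.filter (fun q => !(q.2 == c))) hnd' (by
        intro x hx
        have hm := List.mem_filter.mp hx
        rcases List.mem_cons.mp (hall x hm.1) with h | h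
        · exact absurd h (by simpa using hm.2)
        · exact h)
      exact (hperm.append_left _).trans (List.filter_append_perm _ l)

theorem pvFilter_first (names : List String) (c : String) (s : Int) (h : c ∈ names) :
    ∃ rest, (PySem.List.enumerate names s).filter (fun q => q.2 == c)
      = (s + (((PySem.List.index? names c).getD 0 : Nat) : Int), c) :: rest := by
  induction names generalizing s with
  | nil => simp at h
  | cons a t ih =>
      rw [PySem.List.enumerate_cons, List.filter_cons]
      by_cases hac : a = c
      · subst hac
        rw [PySem.List.index?_cons_self]
        refine ⟨(PySem.List.enumerate t (s+1)).filter (fun q => q.2 == a), ?_⟩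
        rw [if_pos (by simp)]
        norm_num
      · rw [PySem.List.index?_cons_of_ne _ hac]
        have hct : c ∈ t := by rcases List.mem_cons.mp h with h' | h'; exact absurd h'.symm hac; exact h'
        obtain ⟨j, hj⟩ := (PySem.List.index?_isSome_iff t c).mpr hct |> fun hs => Option.isSome_iff_exists.mp hs
        obtain ⟨rest, hrest⟩ := ih (s + 1) hct
        refine ⟨rest, ?_⟩
        have : (decide ((a : String) == c) : Bool) = false := by simp [hac]
        simp only [hj, Option.map_some, Option.getD_some]
        rw [if_neg (by simp [hac])]
        rw [hrest, hj]
        simp only [Option.getD_some]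
        congr 1
        congr 1
        push_cast
        ring

theorem pvIdx_take (names : List String) (c : String) (j k : Nat)
    (h : PySem.List.index? names c = some j) : c ∈ names.take k ↔ j < k := by
  induction names generalizing j k with
  | nil => rw [PySem.List.index?_eq_idxOf?] at h; simp [List.idxOf?] at h
  | cons a t ih =>
      cases k with
      | zero => simp
      | succ k =>
          by_cases hac : a = c
          · subst hac
            rw [PySem.List.index?_cons_self] at h
            simp_all
            omega
          · rw [PySem.List.index?_cons_of_ne _ hac] at h
            cases hik : PySem.List.index? t c with
            | none => rw [hik] at h; simp at h
            | some j' =>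
                rw [hik] at h
                have : j = j' + 1 := by simpa using h.symm
                subst this
                rw [List.take_succ_cons]
                simp only [List.mem_cons]
                constructor
                · rintro (h' | h')
                  · exact absurd h'.symm hac
                  · exact have := (ih j' k hik).mp h'; by omega
                · intro h'
                  exact Or.inr ((ih j' k hik).mpr (by omega))

theorem pvD_keys (names : List String) :
    (pvD names).keys = PySem.Set.ofList ((pvPen names).map (·.2)) := by
  unfold pvD
  rw [PySem.Dict.keys_foldl_modify_key (pvPen names) (fun p => p.2) [] (fun _ p v => v ++ [p.1]) PySem.Dict.empty]
  rfl

theorem pvD_nodup (names : List String) : (pvD names).keys.Nodup := by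
  unfold pvD
  exact PySem.Dict.nodup_keys_foldl_modify_key (pvPen names) (fun p => p.2) [] (fun _ p v => v ++ [p.1]) PySem.Dict.empty PySem.Dict.nodup_keys_empty

theorem pvD_getD (names : List String) (c : String) :
    (pvD names).getD c [] = ((pvPen names).filter (fun q => q.2 == c)).map (·.1) := by
  unfold pvD
  rw [show (pvPen names).foldl (fun d p => d.modify p.2 [] (· ++ [p.1])) PySem.Dict.empty
      = ((pvPen names).map Prod.swap).foldl (fun d q => d.modify q.1 [] (· ++ [q.2])) PySem.Dict.empty by
    rw [List.foldl_map]; simp [Prod.fst_swap, Prod.snd_swap]]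
  rw [PySem.Dict.getD_foldl_modify_append]
  simp [PySem.Dict.getD_empty, List.filter_map, Function.comp_def, Prod.swap]

theorem pvGroup_filterMap (names : List String) (c : String)
    (h : c ∈ (pvPen names).map (·.2)) :
    ((pvPen names).filter (fun q => q.2 == c)).filterMap (pvF names)
      = pvGroupPairs c (((pvPen names).filter (fun q => q.2 == c)).map (·.1)) := by
  -- the group is nonempty and every member has name c
  cases hg : (pvPen names).filter (fun q => q.2 == c) with
  | nil =>
      exfalso
      obtain ⟨p, hp, hpc⟩ := List.mem_map.mp h
      have : p ∈ (pvPen names).filter (fun q => q.2 == c) := List.mem_filter.mpr ⟨hp, by simp [hpc]⟩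
      rw [hg] at this; simp at this
  | cons f rest =>
      have hfmem : f ∈ (pvPen names).filter (fun q => q.2 == c) := by rw [hg]; simp
      have hfc : f.2 = c := by simpa using (List.mem_filter.mp hfmem).2
      have hpw : (f :: rest).Pairwise (fun a b => a.1 < b.1) := by
        rw [← hg]; exact (pvPen_pairwise names).filter _
      have hlt : ∀ r ∈ rest, f.1 < r.1 := (List.pairwise_cons.mp hpw).1
      -- pvF on any member q of the group: the filter inside pvF is this same group
      have hFgroup : ∀ q ∈ (f :: rest), (pvPen names).filter (fun q' => q'.2 == q.2) = f :: rest := by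
        intro q hq
        have hqmem : q ∈ (pvPen names).filter (fun q' => q'.2 == c) := by rw [hg]; exact hq
        have hqc : q.2 = c := by simpa using (List.mem_filter.mp hqmem).2
        rw [hqc, hg]
      rw [List.filterMap_cons]
      have hFf : pvF names f = none := by
        unfold pvF
        rw [hFgroup f (by simp)]
        simp
      rw [hFf]
      have hsome : ∀ r ∈ rest, pvF names r = some (r.1, pvMsg c f.1 r.1) := by
        intro r hr
        have hrc : r.2 = c := by
          have : r ∈ (pvPen names).filter (fun q => q.2 == c) := by rw [hg]; exact List.mem_cons_of_mem f hr
          simpa using (List.mem_filter.mp this).2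
        unfold pvF
        rw [hFgroup r (List.mem_cons_of_mem f hr)]
        simp [hrc, hlt r hr]
      have hrest : rest.filterMap (pvF names) = rest.map (fun r => (r.1, pvMsg c f.1 r.1)) := by
        rw [List.filterMap_congr hsome]
        simp
      simp only [hrest, pvGroupPairs, List.map_cons, List.map_map]
      rfl

theorem pvF_fst (names : List String) (p x : Int × String) (h : pvF names p = some x) :
    x.1 = p.1 := by
  unfold pvF at h
  split at h
  · exact absurd h (by simp)
  · split_ifs at h
    cases h; rfl

theorem pvBres_eq_mapF (names : List String) :
    ((pvPen names).filterMap (pvF names)).map (·.2) = pvBres names := by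
  rw [List.map_filterMap]
  unfold pvPen pvBres
  rw [List.filterMap_filter]
  apply List.filterMap_congr
  intro p hp
  obtain ⟨k, hk, rfl⟩ := (PySem.List.mem_enumerate_iff names 0 p).mp hp
  simp only []
  by_cases hc : names[k] = ""
  · rw [if_neg (by simp [hc]), if_neg (by simp [hc])]
  · rw [if_pos (by simp [hc])]
    have hmem : names[k] ∈ names := List.getElem_mem hk
    obtain ⟨j, hj⟩ := Option.isSome_iff_exists.mp ((PySem.List.index?_isSome_iff names names[k]).mpr hmem)
    have hfilter : (pvPen names).filter (fun q => q.2 == names[k])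
        = (PySem.List.enumerate names 0).filter (fun q => q.2 == names[k]) := by
      unfold pvPen
      rw [List.filter_filter]
      apply List.filter_congr
      intro q _
      by_cases hq : q.2 = names[k] <;> simp [hq, hc]
    obtain ⟨rest, hrest⟩ := pvFilter_first names names[k] 0 hmem
    have hz : (0 : Int) + (k : Int) = ((k : Nat) : Int) := by omega
    rw [hz, PySem.List.slice_to_natCast]
    unfold pvF
    rw [hfilter, hrest, hj]
    simp only [Option.getD_some]
    have hcond : ((0 : Int) + (j : Int) < ((k : Nat) : Int)) ↔ names[k] ∈ names.take k := by
      rw [pvIdx_take names names[k] j k hj]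
      omega
    by_cases ht : names[k] ∈ names.take k
    · rw [if_pos (hcond.mpr ht), if_pos (by exact ⟨hc, ht⟩)]
      simp only [Option.map_some]
      congr 1
      simp [pvMsg]
    · rw [if_neg (fun hlt => ht (hcond.mp hlt)), if_neg (by tauto)]
      rfl

theorem pvAlt_eq (entities : List (List (String × String))) :
    validate_no_duplicate_entities_alt entities = pvBres (entities.map pvEntityName) := by
  unfold validate_no_duplicate_entities_alt
  set names := entities.map pvEntityName with hnames
  -- Stage 1: positions = pvD names
  have hpos : (PySem.List.enumerate entities 0).foldl
      (fun (d : PySem.Dict String (List Int)) (p : Int × List (String × String)) =>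
        let name := pvEntityName p.2
        if name = "" then d
        else d.modify name [] (· ++ [p.1]))
      PySem.Dict.empty = pvD names := by
    have habs : (PySem.List.enumerate entities 0).foldl
        (fun (d : PySem.Dict String (List Int)) (p : Int × List (String × String)) =>
          let name := pvEntityName p.2
          if name = "" then d
          else d.modify name [] (· ++ [p.1]))
        PySem.Dict.empty
        = (PySem.List.enumerate names 0).foldl
          (fun (d : PySem.Dict String (List Int)) (p : Int × String) =>
            if p.2 = "" then d else d.modify p.2 [] (· ++ [p.1]))
          PySem.Dict.empty :=
      pvA_abstract' entities 0 PySem.Dict.empty pvEntityName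
        (fun (d : PySem.Dict String (List Int)) (p : Int × String) =>
          if p.2 = "" then d else d.modify p.2 [] (· ++ [p.1]))
    rw [habs]
    have hf : (fun (d : PySem.Dict String (List Int)) (p : Int × String) =>
        if p.2 = "" then d else d.modify p.2 [] (· ++ [p.1]))
        = (fun d p => if p.2 ≠ "" then d.modify p.2 [] (· ++ [p.1]) else d) := by
      funext d p
      by_cases h : p.2 = "" <;> simp [h]
    rw [hf, PySem.List.foldl_ite_eq_foldl_filter (fun (p : Int × String) => p.2 ≠ "")
      (fun (d : PySem.Dict String (List Int)) (p : Int × String) => d.modify p.2 [] (· ++ [p.1]))]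
    rfl
  rw [hpos]
  show ((PySem.List.sorted ((pvD names).items.foldl
      (fun (acc : List (Int × String)) (q : String × List Int) =>
        match q.2 with
        | [] => acc
        | first :: rest => acc ++ rest.map (fun i => (i, pvMsg q.1 first i)))
      []) (fun p => p.1) false).map (fun p => p.2)) = pvBres names
  -- Stage 2: the pair list is the flatMap of the group pairs
  have hfold : (pvD names).items.foldl
      (fun (acc : List (Int × String)) (q : String × List Int) =>
        match q.2 with
        | [] => acc
        | first :: rest => acc ++ rest.map (fun i => (i, pvMsg q.1 first i)))
      [] = (pvD names).items.flatMap (fun q => pvGroupPairs q.1 q.2) := by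
    rw [show (fun (acc : List (Int × String)) (q : String × List Int) =>
        match q.2 with
        | [] => acc
        | first :: rest => acc ++ rest.map (fun i => (i, pvMsg q.1 first i)))
        = (fun acc q => acc ++ pvGroupPairs q.1 q.2) by
      funext acc q
      cases q.2 <;> simp [pvGroupPairs]]
    rw [PySem.List.foldl_append_eq_flatMap]
    rfl
  rw [hfold]
  -- Stage 3: rewrite items via keys and getD, then per group
  set ks := (pvD names).keys with hks
  rw [PySem.Dict.items_eq_map_keys (pvD names) (pvD_nodup names) [], List.flatMap_map]
  have hgrp : ks.flatMap (fun c => pvGroupPairs c ((pvD names).getD c []))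
      = (ks.flatMap (fun c => (pvPen names).filter (fun q => q.2 == c))).filterMap (pvF names) := by
    rw [List.filterMap_flatMap]
    apply List.flatMap_congr
    intro c hc
    have hcmem : c ∈ (pvPen names).map (·.2) := by
      rw [hks, pvD_keys] at hc
      exact (PySem.Set.mem_ofList _ _).mp hc
    rw [pvD_getD, pvGroup_filterMap names c hcmem]
  rw [hgrp]
  -- Stage 4: permutation + sortedness gives the sorted list exactly
  have hperm : (ks.flatMap (fun c => (pvPen names).filter (fun q => q.2 == c))).Perm (pvPen names) := by
    apply pvGroup_perm
    · rw [hks]; exact pvD_nodup names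
    · intro x hx
      rw [hks, pvD_keys]
      exact (PySem.Set.mem_ofList _ _).mpr (List.mem_map_of_mem hx)
  have hpw : ((pvPen names).filterMap (pvF names)).Pairwise (fun a b => a.1 < b.1) := by
    apply List.Pairwise.filterMap (pvF names)
      (fun a a' hlt b hb b' hb' => by
        rw [pvF_fst names a b hb, pvF_fst names a' b' hb']; exact hlt)
      (pvPen_pairwise names)
  rw [PySem.List.sorted_eq_of_perm_of_pairwise_lt _ ((pvPen names).filterMap (pvF names))
    (fun p => p.1) (hperm.filterMap (pvF names)).symm hpw]
  exact pvBres_eq_mapF names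

theorem pvA_abstract (entities : List (List (String × String))) (s : Int)
    (st : List String × PySem.Dict String Int) :
    (PySem.List.enumerate entities s).foldl
      (fun (st : List String × PySem.Dict String Int) (p : Int × List (String × String)) =>
        let entity_name := pvEntityName p.2
        if entity_name = "" then st
        else
          match st.2.get? entity_name with
          | some j => (st.1 ++ [pvMsg entity_name j p.1], st.2)
          | none   => (st.1, st.2.insert entity_name p.1)) st
      = (PySem.List.enumerate (entities.map pvEntityName) s).foldl pvStep st := by
  exact pvA_abstract' entities s st pvEntityName pvStep

-- ===== VERDICT (by name: the statement is the Claim_ definition above) =====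
theorem validate_no_duplicate_entities_spec : Claim_equal_validate_no_duplicate_entities := by
  intro entities _
  unfold Spec_validate_no_duplicate_entities validate_no_duplicate_entities
  rw [pvA_abstract, pvAlt_eq]
  exact (pvMain (entities.map pvEntityName)).1
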